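-- pv_equiv track=rewrite | github.com/openxjarvis/clawdbot-python | openclaw/agents/tools/patch.py | _seek_sequence
-- ===== SOURCE A (Python) =====
-- def _seek_sequence(
--     lines: list[str],
--     pattern: list[str],
--     start: int,
--     is_end_of_file: bool,
-- ) -> int | None:
--     """Find the first occurrence of pattern starting at 'start'.
--
--     Mirrors TS seekSequence().
--     """
--     if not pattern:
--         return start
--
--     if is_end_of_file:
--         # Search backward from end
--         for i in range(len(lines) - len(pattern), start - 1, -1):
--             if lines[i:i + len(pattern)] == pattern:
--                 return i
--         return None
--
--     for i in range(start, len(lines) - len(pattern) + 1):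
--         if lines[i:i + len(pattern)] == pattern:
--             return i
--     return None
-- ===== SOURCE B (Python) =====
-- # Rabin-Karp style line-sequence search: hash each line once, slide a window
-- # sum; the full slice comparison runs only on a hash hit. B clamps a negative
-- # 'start' to 0 (A's negative slice indices wrap to end-of-list positions).
--
-- _B = 1000003
-- _M = (1 << 61) - 1
--
--
-- def _line_hash(s):
--     h = 0
--     for ch in s:
--         h = (h * _B + ord(ch)) % _M
--     return h
--
--
-- def _seek_sequence(lines, pattern, start, is_end_of_file):
--     if not pattern:
--         return start
--     n = len(lines)
--     m = len(pattern)
--     lo = start if start > 0 else 0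
--     if n - m < lo:
--         return None
--     codes = [_line_hash(l) for l in lines]
--     target = sum(_line_hash(p) for p in pattern)
--     if is_end_of_file:
--         i = n - m
--         window = sum(codes[i:i + m])
--         while True:
--             if window == target and lines[i:i + m] == pattern:
--                 return i
--             if i == lo:
--                 return None
--             window += codes[i - 1] - codes[i + m - 1]
--             i -= 1
--     i = lo
--     window = sum(codes[i:i + m])
--     while True:
--         if window == target and lines[i:i + m] == pattern:
--             return i
--         if i == n - m:
--             return None
--         window += codes[i + m] - codes[i]
--         i += 1
-- ===== Notes on version B (the rewrite author's own statement) =====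
-- stated objective: alternative
-- what changed: B replaces A's per-position list-slice comparison with a Rabin-Karp style scan: each line is hashed once, a rolling window sum is maintained in O(1) per position, and the full slice comparison runs only on a hash hit; B also clamps a negative start to 0 (see differs).
-- intended difference: On forward search with negative start where the pattern occurs within |start| lines of the end (ending before the last line), A's Python negative-slice wraparound returns a negative index (e.g. -2), while B clamps start to 0 and returns the first real occurrence or None, which is the intended line index. — e.g. on _seek_sequence(["a", "b"], ["a"], -2, false): A returns some (-2), B returns some 0
import Mathlib
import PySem

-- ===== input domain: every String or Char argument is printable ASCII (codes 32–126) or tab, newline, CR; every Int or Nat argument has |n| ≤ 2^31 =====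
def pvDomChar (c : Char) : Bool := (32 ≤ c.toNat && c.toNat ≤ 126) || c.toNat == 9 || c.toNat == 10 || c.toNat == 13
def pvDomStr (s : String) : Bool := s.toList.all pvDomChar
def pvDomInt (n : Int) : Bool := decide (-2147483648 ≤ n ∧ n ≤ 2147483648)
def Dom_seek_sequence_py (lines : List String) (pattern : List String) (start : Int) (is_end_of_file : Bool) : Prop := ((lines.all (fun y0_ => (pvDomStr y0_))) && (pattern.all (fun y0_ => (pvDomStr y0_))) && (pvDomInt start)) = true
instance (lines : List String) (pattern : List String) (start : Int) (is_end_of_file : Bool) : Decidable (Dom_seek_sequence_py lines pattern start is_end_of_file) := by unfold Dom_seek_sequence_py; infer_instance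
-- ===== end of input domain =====

-- B replaces A's per-position slice comparison by a Rabin-Karp style rolling
-- window sum over per-line hashes (the slice comparison runs only on a hash hit);
-- on negative `start` B clamps to 0 instead of A's Python negative-slice wraparound (see D_).

-- ===== PORT A =====
def seek_sequence_py (lines : List String) (pattern : List String) (start : Int) (is_end_of_file : Bool) : Option Int :=
  if pattern = [] then some start
  else if is_end_of_file then
    (PySem.List.pyRange ((lines.length : Int) - (pattern.length : Int)) (start - 1) (-1)).find?
      (fun i => PySem.List.slice lines (some i) (some (i + (pattern.length : Int))) == pattern)
  else
    (PySem.List.pyRange start ((lines.length : Int) - (pattern.length : Int) + 1) 1).find?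
      (fun i => PySem.List.slice lines (some i) (some (i + (pattern.length : Int))) == pattern)

-- ===== PORT B =====
-- _line_hash: polynomial hash of one line, mod 2^61-1
def pvLineHash (s : String) : Int :=
  s.toList.foldl (fun h c => PySem.Int.mod (h * 1000003 + (c.toNat : Int)) 2305843009213693951) 0

-- forward while-loop of Source B (fuel is only a termination guard; the loop exits on i == nm)
def pvSeekFwd (lines pattern : List String) (codes : List Int) (target : Int) (nm : Nat)
    (fuel : Nat) (i : Nat) (window : Int) : Option Int :=
  if window == target && (PySem.List.slice lines (some (i : Int)) (some ((i : Int) + (pattern.length : Int))) == pattern) then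
    some (i : Int)
  else if i == nm then none
  else match fuel with
    | 0 => none
    | f + 1 =>
      pvSeekFwd lines pattern codes target nm f (i + 1)
        (window + PySem.List.pyGetD codes ((i : Int) + (pattern.length : Int)) 0
                - PySem.List.pyGetD codes (i : Int) 0)

-- backward while-loop of Source B (fuel is only a termination guard; the loop exits on i == lo)
def pvSeekBwd (lines pattern : List String) (codes : List Int) (target : Int) (lo : Nat)
    (fuel : Nat) (i : Nat) (window : Int) : Option Int :=
  if window == target && (PySem.List.slice lines (some (i : Int)) (some ((i : Int) + (pattern.length : Int))) == pattern) then
    some (i : Int)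
  else if i == lo then none
  else match fuel with
    | 0 => none
    | f + 1 =>
      pvSeekBwd lines pattern codes target lo f (i - 1)
        (window + PySem.List.pyGetD codes ((i : Int) - 1) 0
                - PySem.List.pyGetD codes ((i : Int) + (pattern.length : Int) - 1) 0)

def seek_sequence_py_alt (lines : List String) (pattern : List String) (start : Int) (is_end_of_file : Bool) : Option Int :=
  if pattern = [] then some start
  else
    let n := lines.length
    let m := pattern.length
    let lo : Int := if start > 0 then start else 0
    if (n : Int) - (m : Int) < lo then none
    else
      let codes := lines.map pvLineHash
      let target := (pattern.map pvLineHash).sum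
      if is_end_of_file then
        pvSeekBwd lines pattern codes target lo.toNat (n - m - lo.toNat) (n - m)
          ((PySem.List.slice codes (some ((n - m : Nat) : Int)) (some (((n - m : Nat) : Int) + (m : Int)))).sum)
      else
        pvSeekFwd lines pattern codes target (n - m) (n - m - lo.toNat) lo.toNat
          ((PySem.List.slice codes (some ((lo.toNat : Nat) : Int)) (some (((lo.toNat : Nat) : Int) + (m : Int)))).sum)

-- ===== PRECONDITION & SPEC =====
-- On forward search with negative `start`, A's slice lines[i:i+m] at negative i wraps to
-- end-of-list positions, so A returns a negative "index" when the pattern occurs within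
-- |start| lines of the end (ending before the last line); B clamps start to 0 and returns
-- the first real occurrence (or None), the intended behaviour.
def D_seek_sequence_py (lines : List String) (pattern : List String) (start : Int) (is_end_of_file : Bool) : Prop :=
  is_end_of_file = false ∧ pattern ≠ [] ∧ start < 0 ∧
    ∃ p ∈ List.range lines.length,
      (lines.length : Int) + start ≤ (p : Int) ∧ p + pattern.length < lines.length ∧
        (lines.drop p).take pattern.length = pattern
instance (lines : List String) (pattern : List String) (start : Int) (is_end_of_file : Bool) : Decidable (D_seek_sequence_py lines pattern start is_end_of_file) := by unfold D_seek_sequence_py; infer_instance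

def Spec_seek_sequence_py (lines : List String) (pattern : List String) (start : Int) (is_end_of_file : Bool) (out : Option Int) : Prop := ¬ D_seek_sequence_py lines pattern start is_end_of_file → out = seek_sequence_py_alt lines pattern start is_end_of_file
instance (lines : List String) (pattern : List String) (start : Int) (is_end_of_file : Bool) (out : Option Int) : Decidable (Spec_seek_sequence_py lines pattern start is_end_of_file out) := by unfold Spec_seek_sequence_py; infer_instance

def pvDiffWitness_seek_sequence_py : List String × List String × Int × Bool := (["a", "b"], ["a"], -2, false)
def pvDiffWitnessOut_seek_sequence_py : (Option Int) × (Option Int) := (some (-2), some 0)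

-- ===== CLAIM (what is proved, stated in full; the proofs are below) =====
def Claim_unchanged_seek_sequence_py : Prop := ∀ (lines : List String) (pattern : List String) (start : Int) (is_end_of_file : Bool), Dom_seek_sequence_py lines pattern start is_end_of_file → Spec_seek_sequence_py lines pattern start is_end_of_file (seek_sequence_py lines pattern start is_end_of_file)
def Claim_changed_seek_sequence_py : Prop := Dom_seek_sequence_py (pvDiffWitness_seek_sequence_py.1) (pvDiffWitness_seek_sequence_py.2.1) (pvDiffWitness_seek_sequence_py.2.2.1) (pvDiffWitness_seek_sequence_py.2.2.2) ∧ D_seek_sequence_py (pvDiffWitness_seek_sequence_py.1) (pvDiffWitness_seek_sequence_py.2.1) (pvDiffWitness_seek_sequence_py.2.2.1) (pvDiffWitness_seek_sequence_py.2.2.2) ∧ seek_sequence_py (pvDiffWitness_seek_sequence_py.1) (pvDiffWitness_seek_sequence_py.2.1) (pvDiffWitness_seek_sequence_py.2.2.1) (pvDiffWitness_seek_sequence_py.2.2.2) = pvDiffWitnessOut_seek_sequence_py.1 ∧ seek_sequence_py_alt (pvDiffWitness_seek_sequence_py.1) (pvDiffWitness_seek_sequence_py.2.1) (pvDiffWitness_seek_sequence_py.2.2.1)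 (pvDiffWitness_seek_sequence_py.2.2.2) = pvDiffWitnessOut_seek_sequence_py.2 ∧ pvDiffWitnessOut_seek_sequence_py.1 ≠ pvDiffWitnessOut_seek_sequence_py.2
def Claim_exact_seek_sequence_py : Prop := ∀ (lines : List String) (pattern : List String) (start : Int) (is_end_of_file : Bool), Dom_seek_sequence_py lines pattern start is_end_of_file → D_seek_sequence_py lines pattern start is_end_of_file → seek_sequence_py lines pattern start is_end_of_file ≠ seek_sequence_py_alt lines pattern start is_end_of_file

-- ===== LEMMAS AND PROOFS =====

-- the match predicate both loops test: lines[i:i+m] == pattern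
def matchP (lines pattern : List String) (i : Int) : Bool :=
  PySem.List.slice lines (some i) (some (i + (pattern.length : Int))) == pattern

theorem matchP_natCast (lines pattern : List String) (i : Nat) :
    matchP lines pattern (i : Int) = decide ((lines.drop i).take pattern.length = pattern) := by
  by_cases h : (lines.drop i).take pattern.length = pattern <;>
    simp [matchP, PySem.List.slice_natCast_add, h]

-- window sum as a difference of prefix sums
theorem window_sum_eq (codes : List Int) (i m : Nat) :
    ((codes.drop i).take m).sum = (codes.take (i + m)).sum - (codes.take i).sum := by
  rw [List.take_add, List.sum_append]; ring

theorem sum_take_succ_int (codes : List Int) (k : Nat) (hk : k < codes.length) :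
    (codes.take (k + 1)).sum = (codes.take k).sum + codes.getD k 0 := by
  rw [List.take_add_one, List.sum_append]
  simp [List.getElem?_eq_getElem hk, List.getD_eq_getElem?_getD]

-- rolling update: sliding the window one step right
theorem window_roll (codes : List Int) (i m : Nat) (h : i + m < codes.length) :
    ((codes.drop (i + 1)).take m).sum
      = ((codes.drop i).take m).sum + codes.getD (i + m) 0 - codes.getD i 0 := by
  rw [window_sum_eq, window_sum_eq]
  have h1 : (codes.take (i + 1 + m)).sum = (codes.take (i + m)).sum + codes.getD (i + m) 0 := by
    have := sum_take_succ_int codes (i + m) h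
    rw [show i + 1 + m = i + m + 1 by omega]; exact this
  have h2 : (codes.take (i + 1)).sum = (codes.take i).sum + codes.getD i 0 :=
    sum_take_succ_int codes i (by omega)
  rw [h1, h2]; ring

-- a true slice match forces the window hash sum to equal the target sum
theorem window_eq_target (lines pattern : List String) (i : Nat)
    (h : (lines.drop i).take pattern.length = pattern) :
    (((lines.map pvLineHash).drop i).take pattern.length).sum = (pattern.map pvLineHash).sum := by
  rw [← List.map_drop, ← List.map_take, h]


-- the loop guard collapses to the pure slice test under the window invariant
theorem cond_eq (lines pattern : List String) (i : Nat) (window : Int)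
    (hw : window = (((lines.map pvLineHash).drop i).take pattern.length).sum) :
    (window == (pattern.map pvLineHash).sum &&
      (PySem.List.slice lines (some (i : Int)) (some ((i : Int) + (pattern.length : Int))) == pattern))
    = matchP lines pattern (i : Int) := by
  cases h : matchP lines pattern (i : Int) with
  | false =>
    simp only [matchP] at h
    rw [h, Bool.and_false]
  | true =>
    simp only [matchP] at h
    rw [h, Bool.and_true]
    have hsl : (lines.drop i).take pattern.length = pattern := by
      have h2 := h
      rw [PySem.List.slice_natCast_add] at h2
      exact eq_of_beq h2
    simp [hw, window_eq_target lines pattern i hsl]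

-- forward loop of B computes find? over the ascending index range
theorem pvSeekFwd_eq (lines pattern : List String)
    (fuel : Nat) : ∀ (i : Nat) (window : Int),
    i + fuel = lines.length - pattern.length →
    pattern.length ≤ lines.length →
    window = (((lines.map pvLineHash).drop i).take pattern.length).sum →
    pvSeekFwd lines pattern (lines.map pvLineHash) ((pattern.map pvLineHash).sum)
        (lines.length - pattern.length) fuel i window
      = (PySem.List.pyRange (i : Int) ((lines.length : Int) - (pattern.length : Int) + 1) 1).find?
          (matchP lines pattern) := by
  induction fuel with
  | zero =>
    intro i window hfi hmn hw
    have hi : i = lines.length - pattern.length := by omega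
    subst hi
    unfold pvSeekFwd
    rw [cond_eq _ _ _ _ hw]
    rw [PySem.List.pyRange_one_cons (by omega)]
    rw [PySem.List.pyRange_one_eq_nil (by omega)]
    cases h : matchP lines pattern _ <;> simp [h, List.find?]
  | succ f ih =>
    intro i window hfi hmn hw
    have hilt : i < lines.length - pattern.length := by omega
    unfold pvSeekFwd
    rw [cond_eq _ _ _ _ hw]
    rw [PySem.List.pyRange_one_cons (by omega)]
    cases h : matchP lines pattern (i : Int) with
    | true => simp [h, List.find?]
    | false =>
      have hne : (i == lines.length - pattern.length) = false := by
        simp; omega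
      simp only [h, hne, Bool.false_eq_true, if_false, List.find?]
      have hcast : (i : Int) + 1 = ((i + 1 : Nat) : Int) := by push_cast; ring
      rw [hcast]
      have hiw : i + pattern.length < (lines.map pvLineHash).length := by
        rw [List.length_map]; omega
      have hgd : (i : Int) + (pattern.length : Int) = ((i + pattern.length : Nat) : Int) := by
        push_cast; ring
      refine Eq.trans ?_ (ih (i + 1) _ (by omega) hmn rfl)
      congr 1
      rw [hgd, PySem.List.pyGetD_natCast, PySem.List.pyGetD_natCast, hw,
        window_roll _ _ _ hiw]


-- backward loop of B computes find? over the descending index range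
theorem pvSeekBwd_eq (lines pattern : List String) (lo : Nat)
    (fuel : Nat) : ∀ (i : Nat) (window : Int),
    lo + fuel = i →
    i + pattern.length ≤ lines.length →
    window = (((lines.map pvLineHash).drop i).take pattern.length).sum →
    pvSeekBwd lines pattern (lines.map pvLineHash) ((pattern.map pvLineHash).sum)
        lo fuel i window
      = (PySem.List.pyRange (i : Int) ((lo : Int) - 1) (-1)).find? (matchP lines pattern) := by
  induction fuel with
  | zero =>
    intro i window hfi hile hw
    have hi : i = lo := by omega
    subst hi
    unfold pvSeekBwd
    rw [cond_eq _ _ _ _ hw]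
    rw [PySem.List.pyRange_neg_one_cons (by omega)]
    rw [PySem.List.pyRange_neg_one_eq_nil (by omega)]
    cases h : matchP lines pattern _ <;> simp [h, List.find?]
  | succ f ih =>
    intro i window hfi hile hw
    have hgt : lo < i := by omega
    unfold pvSeekBwd
    rw [cond_eq _ _ _ _ hw]
    rw [PySem.List.pyRange_neg_one_cons (by omega)]
    cases h : matchP lines pattern (i : Int) with
    | true => simp [h, List.find?]
    | false =>
      have hne : (i == lo) = false := by simp; omega
      simp only [h, hne, Bool.false_eq_true, if_false, List.find?]
      have hiw : (i - 1) + pattern.length < (lines.map pvLineHash).length := by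
        rw [List.length_map]; omega
      have hgd : (i : Int) + (pattern.length : Int) - 1 = ((i - 1 + pattern.length : Nat) : Int) := by omega
      have hgd2 : (i : Int) - 1 = ((i - 1 : Nat) : Int) := by omega
      rw [hgd, hgd2, PySem.List.pyGetD_natCast, PySem.List.pyGetD_natCast]
      refine Eq.trans ?_ (ih (i - 1) _ (by omega) (by omega) rfl)
      congr 1
      rw [hw]
      have hroll := window_roll (lines.map pvLineHash) (i - 1) pattern.length hiw
      rw [show i - 1 + 1 = i by omega] at hroll
      rw [hroll]
      ring


-- at a negative index, the slice can only equal the (nonempty) pattern via Python's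
-- end-of-list wraparound, i.e. when a real match exists at p = n + i with p + m < n
theorem matchP_neg (lines pattern : List String) (i : Int) (hpat : pattern ≠ [])
    (hi : i < 0) (hmatch : matchP lines pattern i = true) :
    ∃ p : Nat, (p : Int) = (lines.length : Int) + i ∧ p + pattern.length < lines.length ∧
      (lines.drop p).take pattern.length = pattern := by
  have hm : 0 < pattern.length := List.length_pos_iff.mpr hpat
  have hsl : PySem.List.slice lines (some i) (some (i + (pattern.length : Int))) = pattern := by
    simp only [matchP] at hmatch
    exact eq_of_beq hmatch
  have hlen : (PySem.List.slice lines (some i) (some (i + (pattern.length : Int)))).length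
      = pattern.length := by rw [hsl]
  rw [PySem.List.length_slice] at hlen
  unfold PySem.List.slice at hsl
  simp only at hsl
  by_cases hipm : i + (pattern.length : Int) < 0
  · -- stop index itself wraps
    by_cases hnb : (lines.length : Int) + (i + (pattern.length : Int)) < 0
    · -- window entirely left of the list: clamped to the empty slice
      have hb : PySem.List.clampIdx lines.length (i + (pattern.length : Int)) = 0 := by
        simp [PySem.List.clampIdx, hipm, hnb]
      omega
    · have hb : PySem.List.clampIdx lines.length (i + (pattern.length : Int))
          = ((lines.length : Int) + i + (pattern.length : Int)).toNat := by
        simp only [PySem.List.clampIdx, if_pos hipm, if_neg (by omega : ¬ (lines.length : Int) + (i + (pattern.length : Int)) < 0)]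
        congr 1; ring
      by_cases hna : (lines.length : Int) + i < 0
      · have ha : PySem.List.clampIdx lines.length i = 0 := by
          simp [PySem.List.clampIdx, hi, hna]
        omega
      · have ha : PySem.List.clampIdx lines.length i = ((lines.length : Int) + i).toNat := by
          simp [PySem.List.clampIdx, hi, hna]
        refine ⟨((lines.length : Int) + i).toNat, by omega, by omega, ?_⟩
        rw [ha, hb] at hsl
        rw [show ((lines.length : Int) + i + (pattern.length : Int)).toNat
            - ((lines.length : Int) + i).toNat = pattern.length by omega] at hsl
        exact hsl
  · -- stop index is ≥ 0: the slice is shorter than the pattern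
    have hb : PySem.List.clampIdx lines.length (i + (pattern.length : Int))
        ≤ (i + (pattern.length : Int)).toNat := by
      simp only [PySem.List.clampIdx, if_neg hipm]
      omega
    omega


-- descending range splits like an ascending one
theorem pyRange_neg_one_append (a b c : Int) (h1 : c ≤ b) (h2 : b ≤ a) :
    PySem.List.pyRange a c (-1)
      = PySem.List.pyRange a b (-1) ++ PySem.List.pyRange b c (-1) := by
  rw [PySem.List.pyRange_neg_one_eq_reverse a c, PySem.List.pyRange_neg_one_eq_reverse a b,
    PySem.List.pyRange_neg_one_eq_reverse b c,
    PySem.List.pyRange_one_append (c + 1) (b + 1) (a + 1) (by omega) (by omega)]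
  rw [List.reverse_append]


-- under "no real match in the reachable tail region", a negative index never matches
theorem matchP_neg_false (lines pattern : List String) (start i : Int) (hpat : pattern ≠ [])
    (hi : i < 0) (hsi : start ≤ i)
    (hnd : ∀ p : Nat, (lines.length : Int) + start ≤ (p : Int) → p + pattern.length < lines.length →
      (lines.drop p).take pattern.length ≠ pattern) :
    matchP lines pattern i = false := by
  by_contra hh
  have ht : matchP lines pattern i = true := by
    revert hh; cases matchP lines pattern i <;> simp
  obtain ⟨p, hp1, hp2, hp3⟩ := matchP_neg lines pattern i hpat hi ht
  exact hnd p (by omega) hp2 hp3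

-- a real match at p in range makes matchP true at p
theorem matchP_of_match (lines pattern : List String) (p : Nat)
    (h : (lines.drop p).take pattern.length = pattern) :
    matchP lines pattern (p : Int) = true := by
  rw [matchP_natCast]; simp [h]

theorem seek_sequence_py_spec : Claim_unchanged_seek_sequence_py := by
  intro lines pattern start eof _hdom hnD
  show seek_sequence_py lines pattern start eof = seek_sequence_py_alt lines pattern start eof
  by_cases hpat : pattern = []
  · simp [seek_sequence_py, seek_sequence_py_alt, hpat]
  · have hMP : (fun i => PySem.List.slice lines (some i) (some (i + (pattern.length : Int))) == pattern)
        = matchP lines pattern := rfl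
    have hm1 : 0 < pattern.length := List.length_pos_iff.mpr hpat
    simp only [seek_sequence_py, seek_sequence_py_alt, if_neg hpat, hMP]
    set n := lines.length with hn
    set m := pattern.length with hmm
    by_cases hr : (n : Int) - (m : Int) < (if start > 0 then start else 0)
    · -- B returns none immediately; A's scan finds nothing
      rw [if_pos hr]
      by_cases hs : start > 0
      · rw [if_pos hs] at hr
        cases eof <;> simp only [Bool.false_eq_true, if_false, if_true]
        · rw [PySem.List.pyRange_one_eq_nil (by omega)]; rfl
        · rw [PySem.List.pyRange_neg_one_eq_nil (by omega)]; rfl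
      · rw [if_neg hs] at hr
        -- here n < m: every scanned index is negative and cannot match
        have hnm : n < m := by omega
        have hnd : ∀ p : Nat, (n : Int) + start ≤ (p : Int) → p + m < n →
            (lines.drop p).take m ≠ pattern := by
          intro p _ h2 _; omega
        cases eof <;> simp only [Bool.false_eq_true, if_false, if_true]
        · rw [List.find?_eq_none]
          intro x hx
          rw [PySem.List.mem_pyRange_one] at hx
          simp [matchP_neg_false lines pattern start x hpat (by omega) (by omega) hnd]
        · rw [List.find?_eq_none]
          intro x hx
          rw [PySem.List.mem_pyRange_neg_one] at hx
          simp [matchP_neg_false lines pattern start x hpat (by omega) (by omega) hnd]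
    · rw [if_neg hr]
      have hmn : m ≤ n := by
        by_cases hs : start > 0 <;> simp [hs] at hr <;> omega
      have hcnm : ((n - m : Nat) : Int) = (n : Int) - (m : Int) := by omega
      have hlo0 : (0 : Int) ≤ (if start > 0 then start else 0) := by
        by_cases hs : start > 0 <;> simp [hs] <;> omega
      have hloN : (((if start > 0 then start else 0).toNat : Nat) : Int)
          = (if start > 0 then start else 0) := by omega
      have hlon : (if start > 0 then start else 0).toNat ≤ n - m := by omega
      cases eof <;> simp only [Bool.false_eq_true, if_false, if_true]
      · -- forward
        have hB := pvSeekFwd_eq lines pattern (n - m - (if start > 0 then start else 0).toNat)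
          (if start > 0 then start else 0).toNat
          ((PySem.List.slice (lines.map pvLineHash)
              (some (((if start > 0 then start else 0).toNat : Nat) : Int))
              (some ((((if start > 0 then start else 0).toNat : Nat) : Int) + (m : Int)))).sum)
          (by omega) hmn
          (by rw [PySem.List.slice_natCast_add])
        rw [hB]
        by_cases hs : start > 0
        · have : (((if start > 0 then start else 0).toNat : Nat) : Int) = start := by
            rw [if_pos hs]; omega
          rw [this]
        · have hz : (((if start > 0 then start else 0).toNat : Nat) : Int) = 0 := by
            rw [if_neg hs]; rfl
          rw [hz]
          have hsplit := PySem.List.pyRange_one_append start 0 ((n : Int) - (m : Int) + 1)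
            (by omega) (by omega)
          rw [hsplit, List.find?_append]
          have hnone : (PySem.List.pyRange start 0 1).find? (matchP lines pattern) = none := by
            rw [List.find?_eq_none]
            intro x hx
            rw [PySem.List.mem_pyRange_one] at hx
            have hnd : ∀ p : Nat, (n : Int) + start ≤ (p : Int) → p + m < n →
                (lines.drop p).take m ≠ pattern := by
              intro p h1 h2 h3
              exact hnD ⟨rfl, hpat, by omega, p, List.mem_range.mpr (by omega), h1, h2, h3⟩
            simp [matchP_neg_false lines pattern start x hpat (by omega) (by omega) hnd]
          rw [hnone, Option.none_or]
      · -- backward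
        have hB := pvSeekBwd_eq lines pattern (if start > 0 then start else 0).toNat
          (n - m - (if start > 0 then start else 0).toNat) (n - m)
          ((PySem.List.slice (lines.map pvLineHash)
              (some (((n - m : Nat) : Nat) : Int))
              (some ((((n - m : Nat) : Nat) : Int) + (m : Int)))).sum)
          (by omega) (by omega)
          (by rw [PySem.List.slice_natCast_add])
        rw [hB, hcnm]
        by_cases hs : start > 0
        · have : (((if start > 0 then start else 0).toNat : Nat) : Int) = start := by
            rw [if_pos hs]; omega
          rw [this]
        · have hz : (((if start > 0 then start else 0).toNat : Nat) : Int) = 0 := by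
            rw [if_neg hs]; rfl
          rw [hz]
          have hsplit := pyRange_neg_one_append ((n : Int) - (m : Int)) (-1) (start - 1)
            (by omega) (by omega)
          rw [hsplit, List.find?_append]
          norm_num
          cases hfl : (PySem.List.pyRange ((n : Int) - (m : Int)) (-1) (-1)).find? (matchP lines pattern) with
          | some v => rw [Option.or_of_isSome (by simp)]
          | none =>
            rw [Option.none_or]
            rw [List.find?_eq_none]
            intro x hx
            rw [PySem.List.mem_pyRange_neg_one] at hx
            have hnd : ∀ p : Nat, (n : Int) + start ≤ (p : Int) → p + m < n →
                (lines.drop p).take m ≠ pattern := by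
              intro p _ h2 h3
              have hmem : (p : Int) ∈ PySem.List.pyRange ((n : Int) - (m : Int)) (-1) (-1) := by
                rw [PySem.List.mem_pyRange_neg_one]; omega
              have := (List.find?_eq_none.mp hfl) _ hmem
              exact this (matchP_of_match lines pattern p h3)
            simp [matchP_neg_false lines pattern start x hpat (by omega) (by omega) hnd]

-- ===== VERDICT (by name: the statement is the Claim_ definition above) =====

theorem seek_sequence_py_changed : Claim_changed_seek_sequence_py := by
  unfold Claim_changed_seek_sequence_py; decide

-- converse wraparound: a real match at p with p + m < n makes A's slice at the
-- negative index p - n equal to the pattern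
theorem matchP_wrap (lines pattern : List String) (p : Nat)
    (h2 : p + pattern.length < lines.length)
    (h3 : (lines.drop p).take pattern.length = pattern) :
    matchP lines pattern ((p : Int) - (lines.length : Int)) = true := by
  simp only [matchP, PySem.List.slice, PySem.List.clampIdx]
  rw [if_pos (by omega : (p : Int) - (lines.length : Int) < 0),
    if_neg (by omega : ¬ (lines.length : Int) + ((p : Int) - (lines.length : Int)) < 0),
    if_pos (by omega : (p : Int) - (lines.length : Int) + (pattern.length : Int) < 0),
    if_neg (by omega :
      ¬ (lines.length : Int) + ((p : Int) - (lines.length : Int) + (pattern.length : Int)) < 0)]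
  rw [show ((lines.length : Int) + ((p : Int) - (lines.length : Int))).toNat = p by omega,
    show ((lines.length : Int) + ((p : Int) - (lines.length : Int) + (pattern.length : Int))).toNat
      = p + pattern.length by omega,
    show p + pattern.length - p = pattern.length by omega]
  simp [h3]

theorem seek_sequence_py_tight : Claim_exact_seek_sequence_py := by
  intro lines pattern start eof _hdom hD
  obtain ⟨heof, hpat, hneg, p, hpr, hp1, hp2, hp3⟩ := hD
  subst heof
  have hm1 : 0 < pattern.length := List.length_pos_iff.mpr hpat
  have hmn : pattern.length < lines.length := by omega
  have hMP : (fun i => PySem.List.slice lines (some i) (some (i + (pattern.length : Int))) == pattern)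
      = matchP lines pattern := rfl
  -- A returns some negative index
  have hA : ∃ j : Int, j < 0 ∧
      seek_sequence_py lines pattern start false = some j := by
    simp only [seek_sequence_py, if_neg hpat, Bool.false_eq_true, if_false, hMP]
    have hsplit := PySem.List.pyRange_one_append start 0
      ((lines.length : Int) - (pattern.length : Int) + 1) (by omega) (by omega)
    rw [hsplit, List.find?_append]
    have hi0 : ((p : Int) - (lines.length : Int)) ∈ PySem.List.pyRange start 0 1 := by
      rw [PySem.List.mem_pyRange_one]; omega
    cases hfl : (PySem.List.pyRange start 0 1).find? (matchP lines pattern) with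
    | none =>
      exact absurd (matchP_wrap lines pattern p hp2 hp3)
        (by simpa using (List.find?_eq_none.mp hfl) _ hi0)
    | some j =>
      refine ⟨j, ?_, rfl⟩
      have hmem := List.mem_of_find?_eq_some hfl
      rw [PySem.List.mem_pyRange_one] at hmem
      omega
  -- B returns none or a nonnegative index
  have hB : seek_sequence_py_alt lines pattern start false = none ∨
      ∃ k : Int, 0 ≤ k ∧ seek_sequence_py_alt lines pattern start false = some k := by
    simp only [seek_sequence_py_alt, if_neg hpat, Bool.false_eq_true, if_false]
    rw [if_neg (by rw [if_neg (by omega : ¬ start > 0)]; omega)]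
    have hBv := pvSeekFwd_eq lines pattern
      (lines.length - pattern.length - (if start > 0 then start else 0).toNat)
      (if start > 0 then start else 0).toNat
      ((PySem.List.slice (lines.map pvLineHash)
          (some (((if start > 0 then start else 0).toNat : Nat) : Int))
          (some ((((if start > 0 then start else 0).toNat : Nat) : Int) + (pattern.length : Int)))).sum)
      (by rw [if_neg (by omega : ¬ start > 0)]; omega) (by omega)
      (by rw [PySem.List.slice_natCast_add])
    rw [hBv]
    cases hf : (PySem.List.pyRange (((if start > 0 then start else 0).toNat : Nat) : Int)
        ((lines.length : Int) - (pattern.length : Int) + 1) 1).find? (matchP lines pattern) with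
    | none => exact Or.inl rfl
    | some k =>
      refine Or.inr ⟨k, ?_, rfl⟩
      have hmem := List.mem_of_find?_eq_some hf
      rw [PySem.List.mem_pyRange_one] at hmem
      omega
  obtain ⟨j, hj, hAj⟩ := hA
  rcases hB with hB | ⟨k, hk, hBk⟩
  · rw [hAj, hB]; simp
  · rw [hAj, hBk]; intro hc
    injection hc with hc'
    omega
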